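-- pv_equiv track=rewrite | github.com/Thejshri-A/Python-1000 | 753. Air Quality.py | air_quality
-- ===== SOURCE A (Python) =====
-- def air_quality(aqi_values = [45, 80, 150]):
--     classify=[]
--     for aqi in aqi_values:
--         if aqi<50:
--             classify.append("Good")
--         elif aqi<100:
--             classify.append("Moderate")
--         else:
--             classify.append("Polluted")
--     return classify
-- ===== SOURCE B (Python) =====
-- import bisect
--
-- def air_quality(aqi_values=[45, 80, 150]):
--     bounds = [50, 100]
--     labels = ["Good", "Moderate", "Polluted"]
--     return [labels[bisect.bisect_right(bounds, aqi)] for aqi in aqi_values]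
-- ===== Notes on version B (the rewrite author's own statement) =====
-- stated objective: idiomatic
-- what changed: Replaces the cascaded if/elif comparison chain with a sorted threshold table and bisect_right lookup mapping each value to its label.
import Mathlib
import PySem

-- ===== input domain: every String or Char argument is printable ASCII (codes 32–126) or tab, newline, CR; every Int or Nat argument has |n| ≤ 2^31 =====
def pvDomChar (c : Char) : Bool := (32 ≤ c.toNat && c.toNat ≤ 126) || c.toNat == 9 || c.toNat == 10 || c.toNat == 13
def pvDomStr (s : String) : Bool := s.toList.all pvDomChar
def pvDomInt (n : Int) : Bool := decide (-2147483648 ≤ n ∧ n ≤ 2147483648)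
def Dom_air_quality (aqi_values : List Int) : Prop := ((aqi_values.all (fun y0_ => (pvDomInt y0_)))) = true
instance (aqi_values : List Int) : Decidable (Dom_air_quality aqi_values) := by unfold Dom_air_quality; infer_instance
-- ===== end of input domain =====

-- B replaces A's cascaded if/elif chain with a threshold table and a bisect_right lookup (idiomatic; same cost).

-- ===== PORT A =====
-- literal port of A: fold over aqi_values, appending the label chosen by the comparison chain
def air_quality (aqi_values : List Int) : List String :=
  aqi_values.foldl (fun classify aqi =>
    classify ++ [if aqi < 50 then "Good" else if aqi < 100 then "Moderate" else "Polluted"]) []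

-- ===== PORT B =====
-- bisect.bisect_right on a sorted list = number of elements ≤ aqi (exact for sorted `bounds`)
def pyBisectRight (bounds : List Int) (x : Int) : Nat :=
  bounds.countP (fun b => decide (b ≤ x))

def air_quality_alt (aqi_values : List Int) : List String :=
  let bounds : List Int := [50, 100]
  let labels : List String := ["Good", "Moderate", "Polluted"]
  aqi_values.map (fun aqi => labels.getD (pyBisectRight bounds aqi) "")

-- ===== PRECONDITION & SPEC =====
def Spec_air_quality (aqi_values : List Int) (out : List String) : Prop := out = air_quality_alt aqi_values
instance (aqi_values : List Int) (out : List String) : Decidable (Spec_air_quality aqi_values out) := by unfold Spec_air_quality; infer_instance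

-- ===== CLAIM (what is proved, stated in full; the proofs are below) =====
def Claim_equal_air_quality : Prop := ∀ (aqi_values : List Int), Dom_air_quality aqi_values → Spec_air_quality aqi_values (air_quality aqi_values)

-- ===== LEMMAS AND PROOFS =====

-- A's foldl-with-append is the map of its per-element label function
theorem air_quality_foldl (l : List Int) (acc : List String) :
    l.foldl (fun classify aqi =>
      classify ++ [if aqi < 50 then "Good" else if aqi < 100 then "Moderate" else "Polluted"]) acc
    = acc ++ l.map (fun aqi => if aqi < 50 then "Good" else if aqi < 100 then "Moderate" else "Polluted") := by
  induction l generalizing acc with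
  | nil => simp
  | cons x xs ih => simp [List.foldl, ih]

-- pointwise: the bisect lookup agrees with the comparison chain
theorem label_eq (aqi : Int) :
    (["Good", "Moderate", "Polluted"] : List String).getD (pyBisectRight [50, 100] aqi) ""
    = (if aqi < 50 then "Good" else if aqi < 100 then "Moderate" else "Polluted") := by
  unfold pyBisectRight
  by_cases h1 : aqi < 50
  · have : ¬ (50 : Int) ≤ aqi := by omega
    have : ¬ (100 : Int) ≤ aqi := by omega
    simp [List.countP, List.countP.go, *]
  · by_cases h2 : aqi < 100
    · have : (50 : Int) ≤ aqi := by omega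
      have : ¬ (100 : Int) ≤ aqi := by omega
      simp [List.countP, List.countP.go, *]
    · have : (50 : Int) ≤ aqi := by omega
      have : (100 : Int) ≤ aqi := by omega
      simp [List.countP, List.countP.go, *]

-- ===== VERDICT (by name: the statement is the Claim_ definition above) =====
theorem air_quality_spec : Claim_equal_air_quality := by
  intro aqi_values _
  unfold Spec_air_quality air_quality air_quality_alt
  rw [air_quality_foldl]
  simp only [List.nil_append]
  exact List.map_congr_left (fun a _ => (label_eq a).symm)
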